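-- pv_equiv track=rewrite | github.com/kenchan0226/control-sum-cmdp | utils/cost.py | count_named_entity_appear_frequency
-- ===== SOURCE A (Python) =====
-- def count_named_entity_appear_frequency(doc_word_list, entity_words):
--     # check if it appears in document
--     match = False
--     appear_frequency = 0
--     for doc_start_idx in range(len(doc_word_list) - len(entity_words) + 1):
--         match = True
--         for entity_word_idx, entity_word in enumerate(entity_words):
--             doc_word = doc_word_list[doc_start_idx + entity_word_idx]
--             if doc_word.lower() != entity_word.lower():
--                 match = False
--                 break
--         if match:
--             appear_frequency += 1
--     return appear_frequency
-- ===== SOURCE B (Python) =====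
-- def count_named_entity_appear_frequency(doc_word_list, entity_words):
--     doc = [w.lower() for w in doc_word_list]
--     if not entity_words:
--         # the empty sequence occurs at every window position
--         return len(doc) + 1
--     ent = [w.lower() for w in entity_words]
--     positions = [i for i in range(len(doc) - len(ent) + 1) if doc[i] == ent[0]]
--     for k in range(1, len(ent)):
--         w = ent[k]
--         positions = [p for p in positions if doc[p + k] == w]
--     return len(positions)
-- ===== Notes on version B (the rewrite author's own statement) =====
-- stated objective: alternative
-- what changed: B lowercases document and entity once up front, then counts occurrences by level filtering: it builds the list of positions of the first entity token and prunes it token by token (one pass per entity token over the surviving candidates), instead of A's nested loop over every window start that re-lowercases both words at each comparison.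
import Mathlib
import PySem

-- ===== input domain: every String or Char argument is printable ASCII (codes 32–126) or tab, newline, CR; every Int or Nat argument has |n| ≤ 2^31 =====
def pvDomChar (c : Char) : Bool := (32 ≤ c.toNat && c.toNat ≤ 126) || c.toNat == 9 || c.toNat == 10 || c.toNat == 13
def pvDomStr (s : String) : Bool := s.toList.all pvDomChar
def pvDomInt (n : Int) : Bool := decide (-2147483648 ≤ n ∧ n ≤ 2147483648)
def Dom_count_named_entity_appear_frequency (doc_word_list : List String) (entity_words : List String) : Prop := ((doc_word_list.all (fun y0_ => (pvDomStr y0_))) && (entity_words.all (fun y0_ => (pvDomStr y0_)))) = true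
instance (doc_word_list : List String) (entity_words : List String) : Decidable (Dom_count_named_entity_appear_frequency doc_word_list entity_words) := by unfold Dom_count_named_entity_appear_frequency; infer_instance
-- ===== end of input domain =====

-- B lowercases both lists once, then counts matches by level filtering: it collects the positions of the
-- first entity token and prunes that candidate list one entity token at a time, instead of A's nested
-- index loop over every window start that re-lowercases both words at each comparison (alternative algorithm, same worst-case cost).


-- ===== PORT A =====
-- inner 'for entity_word_idx, entity_word in enumerate(entity_words)' loop with its break;
-- the 'none' branch is Python's IndexError, unreachable for the window starts the outer range produces
def pvAInner (doc_word_list : List String) (doc_start_idx : Int) (entity_word_idx : Int) : List String → Bool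
  | [] => true
  | entity_word :: rest =>
    match PySem.List.pyGet? doc_word_list (doc_start_idx + entity_word_idx) with
    | none => false
    | some doc_word =>
      if PySem.Str.lower doc_word ≠ PySem.Str.lower entity_word then false
      else pvAInner doc_word_list doc_start_idx (entity_word_idx + 1) rest

def count_named_entity_appear_frequency (doc_word_list : List String) (entity_words : List String) : Int :=
  (PySem.List.pyRange 0 ((doc_word_list.length : Int) - (entity_words.length : Int) + 1) 1).foldl
    (fun appear_frequency doc_start_idx =>
      if pvAInner doc_word_list doc_start_idx 0 entity_words then appear_frequency + 1
      else appear_frequency) 0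

-- ===== PORT B =====
-- indexing doc[i], doc[p+k], ent[k] is ported with pyGetD: exact here because candidate positions
-- keep the whole window inside the document and k only ranges over 1..len(ent)-1
def count_named_entity_appear_frequency_alt (doc_word_list : List String) (entity_words : List String) : Int :=
  let doc := doc_word_list.map PySem.Str.lower
  match entity_words with
  | [] => (doc.length : Int) + 1
  | _ :: _ =>
    let ent := entity_words.map PySem.Str.lower
    let positions := (PySem.List.pyRange 0 ((doc.length : Int) - (ent.length : Int) + 1) 1).foldl
      (fun acc i =>
        if PySem.List.pyGetD doc i "" == PySem.List.pyGetD ent 0 "" then acc ++ [i] else acc) []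
    let final := (PySem.List.pyRange 1 (ent.length : Int) 1).foldl
      (fun ps k => ps.foldl
        (fun acc p =>
          if PySem.List.pyGetD doc (p + k) "" == PySem.List.pyGetD ent k ""
          then acc ++ [p] else acc) []) positions
    (final.length : Int)

-- ===== PRECONDITION & SPEC =====
def Spec_count_named_entity_appear_frequency (doc_word_list : List String) (entity_words : List String) (out : Int) : Prop := out = count_named_entity_appear_frequency_alt doc_word_list entity_words
instance (doc_word_list : List String) (entity_words : List String) (out : Int) : Decidable (Spec_count_named_entity_appear_frequency doc_word_list entity_words out) := by unfold Spec_count_named_entity_appear_frequency; infer_instance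

-- ===== CLAIM (what is proved, stated in full; the proofs are below) =====
def Claim_equal_count_named_entity_appear_frequency : Prop := ∀ (doc_word_list : List String) (entity_words : List String), Dom_count_named_entity_appear_frequency doc_word_list entity_words → Spec_count_named_entity_appear_frequency doc_word_list entity_words (count_named_entity_appear_frequency doc_word_list entity_words)

-- ===== LEMMAS AND PROOFS =====

-- pvAInner only depends on the sum of its two index arguments
lemma pvAInner_shift (doc : List String) (es : List String) :
    ∀ (s k : Int), pvAInner doc s (k + 1) es = pvAInner doc (s + 1) k es := by
  induction es with
  | nil => intro s k; simp [pvAInner]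
  | cons e es ih =>
    intro s k
    have harg : s + (k + 1) = (s + 1) + k := by ring
    simp only [pvAInner, harg]
    cases PySem.List.pyGet? doc ((s + 1) + k) with
    | none => rfl
    | some w =>
      by_cases h : PySem.Str.lower w ≠ PySem.Str.lower e
      · simp [h]
      · simp [h, ih]

-- A's inner loop decides "lowered entity is a prefix of lowered document from position j"
lemma pvAInner_eq (doc : List String) :
    ∀ (es : List String) (j : Nat),
      pvAInner doc (j : Int) 0 es
        = (es.map PySem.Str.lower).isPrefixOf ((doc.map PySem.Str.lower).drop j) := by
  intro es
  induction es with
  | nil => intro j; simp [pvAInner]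
  | cons e es ih =>
    intro j
    simp only [pvAInner, add_zero, PySem.List.pyGet?_natCast]
    by_cases hj : j < doc.length
    · rw [List.getElem?_eq_getElem hj]
      have hdrop : (doc.map PySem.Str.lower).drop j
          = PySem.Str.lower doc[j] :: (doc.map PySem.Str.lower).drop (j + 1) := by
        rw [List.drop_eq_getElem_cons (by simpa using hj)]
        simp
      rw [hdrop]
      dsimp only
      by_cases h : PySem.Str.lower doc[j] ≠ PySem.Str.lower e
      · rw [if_pos h]
        simp only [List.map_cons, List.isPrefixOf]
        rw [ne_eq] at h
        have hb : (PySem.Str.lower e == PySem.Str.lower doc[j]) = false := by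
          rw [beq_eq_false_iff_ne]; exact fun hh => h hh.symm
        simp [hb]
      · rw [ne_eq, not_not] at h
        rw [if_neg (by simp [h])]
        rw [pvAInner_shift doc es (j : Int) 0]
        have hcast : ((j : Int) + 1) = ((j + 1 : Nat) : Int) := by push_cast; ring
        rw [hcast, ih (j + 1)]
        simp [h]
    · rw [List.getElem?_eq_none (by omega)]
      rw [List.drop_of_length_le (by simpa using (by omega : doc.length ≤ j))]
      simp

-- counting form of a fold
lemma pvFoldCount {α : Type} (l : List α) (p : α → Bool) :
    l.foldl (fun acc x => if p x then acc + 1 else acc) (0 : Int) = (l.countP p : Int) := by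
  simpa using PySem.List.foldl_if_add_one (l := l) (p := p) (a := (0 : Int))

-- A's result as a countP over start positions
lemma pvA_as_countP (doc entity : List String) :
    count_named_entity_appear_frequency doc entity
      = (((List.range (((doc.length : Int) - (entity.length : Int) + 1).toNat)).countP
          (fun j => (entity.map PySem.Str.lower).isPrefixOf ((doc.map PySem.Str.lower).drop j))) : Int) := by
  unfold count_named_entity_appear_frequency
  rw [PySem.List.pyRange_one, List.foldl_map]
  have hfun : ∀ (k : Nat), pvAInner doc ((0 : Int) + (k : Int)) 0 entity
      = (entity.map PySem.Str.lower).isPrefixOf ((doc.map PySem.Str.lower).drop k) := by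
    intro k; rw [zero_add, pvAInner_eq]
  simp only [hfun]
  simpa using pvFoldCount (List.range (((doc.length : Int) - (entity.length : Int) + 1).toNat))
    (fun k => (entity.map PySem.Str.lower).isPrefixOf ((doc.map PySem.Str.lower).drop k))

-- positions surviving the first k entity tokens (among window starts that fit)
def pvLevel (D E : List String) (k : Nat) : List Int :=
  ((List.range (((D.length : Int) - (E.length : Int) + 1).toNat)).filter
    (fun j => (D.drop j).take k == E.take k)).map (Nat.cast : Nat → Int)

lemma pvSingleton_beq (a b : String) : (([a] : List String) == [b]) = (a == b) := by
  rw [Bool.eq_iff_iff]; simp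

-- the initial comprehension computes the level-1 positions
lemma pvB_init (D E : List String) (hE : E ≠ []) :
    (PySem.List.pyRange 0 ((D.length : Int) - (E.length : Int) + 1) 1).foldl
      (fun acc i =>
        if PySem.List.pyGetD D i "" == PySem.List.pyGetD E 0 "" then acc ++ [i] else acc) []
      = pvLevel D E 1 := by
  rw [PySem.List.pyRange_one, List.foldl_map]
  rw [show (List.range (((D.length : Int) - (E.length : Int) + 1) - 0).toNat).foldl
      (fun (acc : List Int) (k : Nat) =>
        if PySem.List.pyGetD D ((0 : Int) + (k : Int)) "" == PySem.List.pyGetD E 0 ""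
        then acc ++ [(0 : Int) + (k : Int)] else acc) []
      = ([] : List Int) ++ ((List.range (((D.length : Int) - (E.length : Int) + 1) - 0).toNat).filter
          (fun (k : Nat) => PySem.List.pyGetD D ((0 : Int) + (k : Int)) "" == PySem.List.pyGetD E 0 "")).map
            (fun (k : Nat) => (0 : Int) + (k : Int)) from
    PySem.List.foldl_append_if _ _ _ _]
  rw [List.nil_append]
  have hrange : (((D.length : Int) - (E.length : Int) + 1) - 0).toNat
      = (((D.length : Int) - (E.length : Int) + 1)).toNat := by omega
  rw [hrange]
  have hm : 1 ≤ E.length := by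
    cases E with
    | nil => exact absurd rfl hE
    | cons a l => simp
  obtain ⟨E0, Etl, rfl⟩ : ∃ E0 Etl, E = E0 :: Etl := by
    cases E with
    | nil => exact absurd rfl hE
    | cons a l => exact ⟨a, l, rfl⟩
  unfold pvLevel
  refine Eq.trans (congrArg _ (List.filter_congr ?_)) (List.map_congr_left ?_)
  · intro j hj
    have hj' : j < D.length := by
      have := List.mem_range.mp hj
      simp only [List.length_cons] at this hm ⊢
      omega
    have hdrop : D.drop j = D[j] :: D.drop (j + 1) := List.drop_eq_getElem_cons hj'
    show (PySem.List.pyGetD D (0 + (j : Int)) "" == PySem.List.pyGetD (E0 :: Etl) 0 "")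
        = ((D.drop j).take 1 == (E0 :: Etl).take 1)
    rw [zero_add, PySem.List.pyGetD_natCast, PySem.List.pyGetD_zero, hdrop]
    rw [List.getD_eq_getElem D "" hj']
    simp only [List.getD_cons_zero, List.take_succ_cons, List.take_zero]
    rw [pvSingleton_beq]
  · intro j hj
    show (0 : Int) + (j : Int) = (j : Int)
    exact zero_add _

-- prefix test vs take-equality, Bool-level
lemma pvPrefix_take {α : Type} [DecidableEq α] (l L : List α) :
    (L.take l.length == l) = l.isPrefixOf L := by
  rw [Bool.eq_iff_iff, beq_iff_eq, List.isPrefixOf_iff_prefix]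
  constructor
  · intro hc; rw [← hc]; exact List.take_prefix _ _
  · intro h; exact (List.prefix_iff_eq_take.mp h).symm

-- extending a partial match by one more entity token
lemma pvStep (D E : List String) (k j : Nat) (hk : k < E.length) :
    (((D.drop j).take k == E.take k)
      && (decide ((j : Int) + ((k : Int)) < (D.length : Int))
          && (PySem.List.pyGetD D ((j : Int) + (k : Int)) "" == PySem.List.pyGetD E (k : Int) "")))
      = ((D.drop j).take (k + 1) == E.take (k + 1)) := by
  have hcast : ((j : Int) + (k : Int)) = ((j + k : Nat) : Int) := by push_cast; ring
  rw [hcast, PySem.List.pyGetD_natCast, PySem.List.pyGetD_natCast]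
  have hdec : (decide ((((j + k : Nat)) : Int) < (D.length : Int))) = decide (j + k < D.length) := by
    rw [decide_eq_decide]; omega
  rw [hdec]
  rw [Bool.eq_iff_iff]
  simp only [Bool.and_eq_true, beq_iff_eq, decide_eq_true_eq]
  have hEk : E.getD k "" = E[k] := List.getD_eq_getElem E "" hk
  have hEtake : E.take (k + 1) = E.take k ++ [E[k]] := by
    rw [List.take_succ, List.getElem?_eq_getElem hk]; rfl
  have hDtake : (D.drop j).take (k + 1) = (D.drop j).take k ++ (D[j + k]?).toList := by
    rw [List.take_succ, List.getElem?_drop]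
  constructor
  · rintro ⟨h1, h2, h3⟩
    rw [hDtake, hEtake, h1]
    congr 1
    rw [List.getElem?_eq_getElem h2]
    rw [List.getD_eq_getElem D "" h2] at h3
    rw [h3, hEk]; rfl
  · intro h
    rw [hDtake, hEtake] at h
    cases hopt : D[j + k]? with
    | none =>
      exfalso
      rw [hopt] at h
      have hlen := congrArg List.length h
      have htk : ((D.drop j).take k).length ≤ k := by
        simp
      simp at hlen
      omega
    | some v =>
      rw [hopt] at h
      have hlen := congrArg List.length h
      have hlen' : ((D.drop j).take k).length = (E.take k).length := by
        simp [Nat.le_of_lt hk] at hlen ⊢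
        omega
      obtain ⟨h1, h2⟩ := List.append_inj h hlen'
      have hv : v = E[k] := by simpa using h2
      have hlt : j + k < D.length := by
        have : (D[j + k]?).isSome := by rw [hopt]; rfl
        simpa using this
      refine ⟨h1, hlt, ?_⟩
      rw [List.getD_eq_getElem D "" hlt]
      have : D[j + k]? = some D[j + k] := List.getElem?_eq_getElem hlt
      rw [hopt] at this
      rw [← Option.some.inj this, hv]
      exact hEk.symm

-- within a fitting window the bound check of pvStep is automatic
lemma pvStepW (D E : List String) (k j : Nat) (hk : k < E.length)
    (hjw : j + E.length ≤ D.length) :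
    (((D.drop j).take k == E.take k)
      && (PySem.List.pyGetD D ((j : Int) + (k : Int)) "" == PySem.List.pyGetD E (k : Int) ""))
      = ((D.drop j).take (k + 1) == E.take (k + 1)) := by
  rw [← pvStep D E k j hk]
  have hlt : decide ((j : Int) + (k : Int) < (D.length : Int)) = true := by
    rw [decide_eq_true_eq]; omega
  rw [hlt, Bool.true_and]

-- the filter loop advances the level one token at a time
lemma pvLoop (D E : List String) :
    ∀ (r : Nat), r + 1 ≤ E.length →
      ((List.range r).foldl
        (fun ps t => ps.foldl
          (fun acc p =>
            if PySem.List.pyGetD D (p + ((1 : Int) + (t : Int))) ""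
                == PySem.List.pyGetD E ((1 : Int) + (t : Int)) ""
            then acc ++ [p] else acc) [])
        (pvLevel D E 1))
      = pvLevel D E (r + 1) := by
  intro r
  induction r with
  | zero => intro _; rfl
  | succ r ih =>
    intro hr
    rw [List.range_succ, List.foldl_append, ih (by omega), List.foldl_cons, List.foldl_nil]
    have hc : ((1 : Int) + (r : Int)) = ((r + 1 : Nat) : Int) := by push_cast; ring
    rw [hc]
    rw [show ∀ (l : List Int) (p : Int → Bool),
        l.foldl (fun acc x => if p x then acc ++ [x] else acc) [] = [] ++ l.filter p from
      fun l p => PySem.List.foldl_append_if_eq_filter p l [], List.nil_append]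
    unfold pvLevel
    rw [List.filter_map, List.filter_filter]
    congr 1
    refine List.filter_congr ?_
    intro j hj
    have hjw : j + E.length ≤ D.length := by
      have := List.mem_range.mp hj
      omega
    simp only [Function.comp]
    exact (Bool.and_comm _ _).trans (pvStepW D E (r + 1) j (by omega) hjw)

-- B's result (nonempty entity) as a countP over fitting window starts
lemma pvB_as_countP (doc : List String) (e0 : String) (etail : List String) :
    count_named_entity_appear_frequency_alt doc (e0 :: etail)
      = (((List.range (((doc.length : Int) - (((e0 :: etail).length : Nat) : Int) + 1).toNat)).countP
          (fun j => ((e0 :: etail).map PySem.Str.lower).isPrefixOf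
            ((doc.map PySem.Str.lower).drop j))) : Int) := by
  unfold count_named_entity_appear_frequency_alt
  simp only []
  rw [pvB_init (doc.map PySem.Str.lower) ((e0 :: etail).map PySem.Str.lower) (by simp)]
  rw [PySem.List.pyRange_one, List.foldl_map]
  have hm1 : ((((e0 :: etail).map PySem.Str.lower).length : Int) - 1).toNat
      = ((e0 :: etail).map PySem.Str.lower).length - 1 := by omega
  rw [hm1]
  rw [pvLoop (doc.map PySem.Str.lower) ((e0 :: etail).map PySem.Str.lower)
    (((e0 :: etail).map PySem.Str.lower).length - 1) (by simp)]
  have hm2 : ((e0 :: etail).map PySem.Str.lower).length - 1 + 1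
      = ((e0 :: etail).map PySem.Str.lower).length := by simp
  rw [hm2]
  unfold pvLevel
  rw [List.length_map, ← List.countP_eq_length_filter]
  have h3 : ((((doc.map PySem.Str.lower).length) : Int)
        - (((e0 :: etail).map PySem.Str.lower).length : Int) + 1).toNat
      = ((doc.length : Int) - (((e0 :: etail).length : Nat) : Int) + 1).toNat := by simp
  rw [h3]
  congr 1
  refine List.countP_congr ?_
  intro j hj
  rw [List.take_length, pvPrefix_take]

-- ===== VERDICT (by name: the statement is the Claim_ definition above) =====
theorem count_named_entity_appear_frequency_spec : Claim_equal_count_named_entity_appear_frequency := by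
  intro doc entity _
  show count_named_entity_appear_frequency doc entity = count_named_entity_appear_frequency_alt doc entity
  cases entity with
  | nil =>
    rw [pvA_as_countP]
    unfold count_named_entity_appear_frequency_alt
    simp [List.countP_eq_length.mpr (by intro a _; rfl)]
  | cons e0 etail =>
    rw [pvA_as_countP, pvB_as_countP]
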